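-- pv_equiv track=rewrite | github.com/antongoransson/EITN41 | HA2/B2.py | excluding_phase
-- ===== SOURCE A (Python) =====
-- def excluding_phase(R, sets):
--     disjoint_sets = 0
--     for item_set in sets:
--         for i in range(len(R)):
--             if not(R[i].isdisjoint(item_set)):
--                 disjoint_sets += 1
--                 index = i
--         if disjoint_sets == 1:
--             R[index] = R[index] & item_set
--         disjoint_sets = 0
--     return R
-- ===== SOURCE B (Python) =====
-- # Alternative algorithm: inverted element -> {R-index} map, maintained incrementally; per item_set the scan
-- # stops as soon as two distinct overlapping R-indices are seen.
-- # (Like A, mutates R in place and returns it.)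
-- def excluding_phase(R, sets):
--     idx = {}
--     for i, r in enumerate(R):
--         for x in r:
--             if x in idx:
--                 idx[x].add(i)
--             else:
--                 idx[x] = {i}
--     for item_set in sets:
--         first = None
--         multiple = False
--         for x in item_set:
--             for i in idx.get(x, ()):
--                 if first is None:
--                     first = i
--                 elif i != first:
--                     multiple = True
--                     break
--             if multiple:
--                 break
--         if first is not None and not multiple:
--             i = first
--             for x in R[i] - item_set:
--                 idx[x].discard(i)
--             R[i] = R[i] & item_set
--     return R
-- ===== Notes on version B (the rewrite author's own statement) =====
-- stated objective: alternative
-- what changed: Replaces A's per-item rescan of every R-set (count overlaps, remember last index) with an inverted element-to-R-index map built once and maintained incrementally; each item_set is decided by scanning the map entries of its elements, stopping as soon as two distinct overlapping R-indices are seen.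
import Mathlib
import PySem

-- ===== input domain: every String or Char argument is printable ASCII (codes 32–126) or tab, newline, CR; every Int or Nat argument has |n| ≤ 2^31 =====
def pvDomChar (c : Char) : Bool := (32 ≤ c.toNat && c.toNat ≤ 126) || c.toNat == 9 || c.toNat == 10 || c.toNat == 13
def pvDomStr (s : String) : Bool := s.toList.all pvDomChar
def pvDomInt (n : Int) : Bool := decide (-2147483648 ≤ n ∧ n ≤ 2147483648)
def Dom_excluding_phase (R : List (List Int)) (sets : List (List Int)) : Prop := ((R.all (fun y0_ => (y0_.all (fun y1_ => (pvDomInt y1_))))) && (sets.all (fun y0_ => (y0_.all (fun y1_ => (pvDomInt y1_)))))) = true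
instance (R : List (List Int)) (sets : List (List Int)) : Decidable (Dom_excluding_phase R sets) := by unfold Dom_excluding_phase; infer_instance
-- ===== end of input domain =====

-- B replaces A's rescan of every R-set per item_set by an inverted element→{R-index} map that is
-- updated incrementally; equivalence is about the RETURN value (both Pythons mutate R in place the same way).

-- ===== PORT A =====
-- one outer step of A: the inner 'for i in range(len(R))' counting loop, then the conditional update;
-- state = (R, index) — Python's 'index' survives across outer iterations (read only when count == 1)
def pvStepA (st : List (List Int) × Int) (item : List Int) : List (List Int) × Int :=
  let r := (PySem.List.pyRange 0 (st.1.length : Int) 1).foldl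
    (fun (p : Int × Int) i =>
      if !(PySem.Set.isdisjoint (PySem.List.pyGetD st.1 i []) item) then (p.1 + 1, i) else p)
    ((0 : Int), st.2)
  if r.1 == 1 then
    (PySem.List.pySetD st.1 r.2 (PySem.Set.inter (PySem.List.pyGetD st.1 r.2 []) item), r.2)
  else (st.1, r.2)

def excluding_phase (R : List (List Int)) (sets : List (List Int)) : List (List Int) :=
  (sets.foldl pvStepA (R, 0)).1

-- ===== PORT B =====
-- inverted index: element x ↦ set of indices i with x ∈ R[i]  ('if x in idx: idx[x].add(i) else: idx[x] = {i}')
def pvBuildIdx (R : List (List Int)) : PySem.Dict Int (PySem.Set Int) :=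
  (PySem.List.enumerate R 0).foldl
    (fun d p => p.2.foldl (fun d x => d.modify x [] (fun s => PySem.Set.add s p.1)) d)
    PySem.Dict.empty

-- the 'for i in idx.get(x, ())' loop: remember the first hit index, break on a second distinct one
def pvScanSet (first : Option Int) (s : PySem.Set Int) : Option Int × Bool :=
  match s, first with
  | [], _ => (first, false)
  | i :: t, none => pvScanSet (some i) t
  | i :: t, some f => if i ≠ f then (some f, true) else pvScanSet (some f) t

-- the 'for x in item_set' loop, broken out of as soon as 'multiple' is set
def pvScan (d : PySem.Dict Int (PySem.Set Int)) (first : Option Int) : List Int → Option Int × Bool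
  | [] => (first, false)
  | x :: xs =>
    let r := pvScanSet first (d.getD x [])
    if r.2 then r else pvScan d r.1 xs

-- one outer step of B: on a unique hit, intersect and drop the vanished elements' index entries
def pvStepB (st : List (List Int) × PySem.Dict Int (PySem.Set Int)) (item : List Int) :
    List (List Int) × PySem.Dict Int (PySem.Set Int) :=
  match pvScan st.2 none item with
  | (some i, false) =>
    let ri := PySem.List.pyGetD st.1 i []
    let idx' := (PySem.Set.diff ri item).foldl
        (fun d x => d.modify x [] (fun s => PySem.Set.discard s i)) st.2
    (PySem.List.pySetD st.1 i (PySem.Set.inter ri item), idx')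
  | _ => st

def excluding_phase_alt (R : List (List Int)) (sets : List (List Int)) : List (List Int) :=
  (sets.foldl pvStepB (R, pvBuildIdx R)).1

-- ===== PRECONDITION & SPEC =====
def Spec_excluding_phase (R : List (List Int)) (sets : List (List Int)) (out : List (List Int)) : Prop := out = excluding_phase_alt R sets
instance (R : List (List Int)) (sets : List (List Int)) (out : List (List Int)) : Decidable (Spec_excluding_phase R sets out) := by unfold Spec_excluding_phase; infer_instance

-- ===== CLAIM (what is proved, stated in full; the proofs are below) =====
def Claim_equal_excluding_phase : Prop := ∀ (R : List (List Int)) (sets : List (List Int)), Dom_excluding_phase R sets → Spec_excluding_phase R sets (excluding_phase R sets)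

-- ===== LEMMAS AND PROOFS =====

-- the invariant tying B's inverted index to the current R
def pvInv (R : List (List Int)) (d : PySem.Dict Int (PySem.Set Int)) : Prop :=
  ∀ x j, j ∈ d.getD x [] ↔ ∃ (k : Nat) (h : k < R.length), j = (k : Int) ∧ x ∈ R[k]

-- inner build loop: add index i under every key of r
theorem pv_build_inner (r : List Int) (i : Int) :
    ∀ (d : PySem.Dict Int (PySem.Set Int)) (x j : Int),
      j ∈ ((r.foldl (fun d x => d.modify x [] (fun s => PySem.Set.add s i)) d).getD x [])
        ↔ j ∈ d.getD x [] ∨ (j = i ∧ x ∈ r) := by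
  induction r with
  | nil => simp
  | cons a r ih =>
    intro d x j
    rw [List.foldl_cons, ih]
    by_cases hx : x = a
    · subst hx
      rw [PySem.Dict.getD_modify_self, PySem.Set.mem_add]
      simp [List.mem_cons]; tauto
    · rw [PySem.Dict.getD_modify_of_ne _ _ _ hx]
      simp [List.mem_cons]; tauto

-- outer build loop over enumerate
theorem pv_build_outer (ps : List (Int × List Int)) :
    ∀ (d : PySem.Dict Int (PySem.Set Int)) (x j : Int),
      j ∈ ((ps.foldl (fun d p => p.2.foldl (fun d x => d.modify x [] (fun s => PySem.Set.add s p.1)) d) d).getD x [])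
        ↔ j ∈ d.getD x [] ∨ ∃ p ∈ ps, j = p.1 ∧ x ∈ p.2 := by
  induction ps with
  | nil => simp
  | cons p ps ih =>
    intro d x j
    rw [List.foldl_cons, ih, pv_build_inner]
    simp [List.mem_cons]; tauto

theorem pv_buildIdx_spec (R : List (List Int)) : pvInv R (pvBuildIdx R) := by
  intro x j
  unfold pvBuildIdx
  rw [pv_build_outer]
  simp only [PySem.List.mem_enumerate_iff]
  constructor
  · rintro (hempty | ⟨p, ⟨k, hk, rfl⟩, rfl, hx⟩)
    · simp [PySem.Dict.getD, PySem.Dict.get?, PySem.Dict.empty] at hempty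
    · exact ⟨k, hk, by simp, hx⟩
  · rintro ⟨k, hk, rfl, hx⟩
    exact Or.inr ⟨((k : Int), R[k]), ⟨k, hk, by simp⟩, rfl, hx⟩

-- A's inner counting fold in closed form
theorem pv_count_fold (P : Int → Bool) :
    ∀ (L : List Int) (c0 j0 : Int),
      L.foldl (fun (p : Int × Int) i => if P i then (p.1 + 1, i) else p) (c0, j0)
        = (c0 + ((L.filter P).length : Int), (L.filter P).getLastD j0) := by
  intro L
  induction L with
  | nil => simp
  | cons a L ih =>
    intro c0 j0
    rw [List.foldl_cons]
    by_cases h : P a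
    · rw [List.filter_cons_of_pos h, if_pos h, ih]
      refine Prod.ext ?_ ?_
      · simp only [List.length_cons]
        push_cast
        ring
      · simp only [List.getLastD_cons]
    · have h' : P a = false := by simpa using h
      rw [if_neg (by simp [h']), List.filter_cons_of_neg (by simp [h']), ih]

-- head of the scanned index stream: the running 'first' if set, else the next element to come
def pvHd (first : Option Int) (l : List Int) : Option Int :=
  match first with
  | some f => some f
  | none => l.head?

theorem pvHd_fix (first : Option Int) (s l : List Int) (h : s ≠ [] ∨ first ≠ none) :
    pvHd (pvHd first s) l = pvHd first s := by
  cases first <;> cases s <;> simp_all [pvHd]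

theorem pvHd_append (first : Option Int) (s l : List Int) :
    pvHd first (s ++ l) = pvHd (pvHd first s) l := by
  cases first <;> cases s <;> simp [pvHd]

theorem pv_scanSet_spec (s : List Int) :
    ∀ first : Option Int, pvScanSet first s
      = (pvHd first s, s.any (fun j => !(some j == pvHd first s))) := by
  induction s with
  | nil => intro first; cases first <;> simp [pvScanSet, pvHd]
  | cons i t ih =>
    intro first
    cases first with
    | none => rw [pvScanSet, ih]; simp [pvHd]
    | some f =>
      rw [pvScanSet]
      by_cases hif : i ≠ f
      · rw [if_pos hif]; simp [pvHd, hif]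
      · push_neg at hif
        rw [if_neg (by simp [hif]), ih]
        simp [pvHd, hif]

theorem pv_scan_spec (d : PySem.Dict Int (PySem.Set Int)) (item : List Int) :
    ∀ first : Option Int, pvScan d first item
      = (pvHd first (item.flatMap (fun x => d.getD x [])),
         (item.flatMap (fun x => d.getD x [])).any
           (fun j => !(some j == pvHd first (item.flatMap (fun x => d.getD x []))))) := by
  induction item with
  | nil => intro first; cases first <;> simp [pvScan, pvHd]
  | cons x xs ih =>
    intro first
    simp only [pvScan, List.flatMap_cons, pv_scanSet_spec, pvHd_append]
    set s : List Int := d.getD x [] with hs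
    set Dl : List Int := xs.flatMap (fun y => d.getD y []) with hDl
    have hH : s ≠ [] ∨ first ≠ none → pvHd (pvHd first s) Dl = pvHd first s :=
      fun h => pvHd_fix first s Dl h
    by_cases hb : s.any (fun j => !(some j == pvHd first s)) = true
    · rw [if_pos hb]
      have hne : s ≠ [] := by
        intro h
        rw [h] at hb
        simp at hb
      rw [hH (Or.inl hne)]
      refine Prod.ext rfl ?_
      simp only [List.any_append, hb, Bool.true_or]
    · rw [if_neg hb, ih]
      by_cases hcase : s = [] ∧ first = none
      · obtain ⟨h1, h2⟩ := hcase
        subst h2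
        rw [h1]
        simp [pvHd]
      · have hHH : pvHd (pvHd first s) Dl = pvHd first s := hH (by tauto)
        rw [hHH]
        refine Prod.ext rfl ?_
        rw [List.any_append]
        have hbf : s.any (fun j => !(some j == pvHd first s)) = false := by
          simpa using hb
        rw [hbf]
        simp

-- discard loop in closed form (discard is idempotent, so no Nodup hypothesis is needed)
theorem pv_discard_fold (i : Int) :
    ∀ (l : List Int) (d : PySem.Dict Int (PySem.Set Int)) (x : Int),
      ((l.foldl (fun d y => d.modify y [] (fun s => PySem.Set.discard s i)) d).getD x [])
        = if x ∈ l then PySem.Set.discard (d.getD x []) i else d.getD x [] := by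
  intro l
  induction l with
  | nil => simp
  | cons a l ih =>
    intro d x
    rw [List.foldl_cons, ih]
    by_cases hx : x ∈ l
    · rw [if_pos hx, if_pos (List.mem_cons_of_mem _ hx)]
      by_cases hxa : x = a
      · subst hxa
        rw [PySem.Dict.getD_modify_self]
        simp [PySem.Set.discard, List.filter_filter]
      · rw [PySem.Dict.getD_modify_of_ne _ _ _ hxa]
    · rw [if_neg hx]
      by_cases hxa : x = a
      · subst hxa
        rw [PySem.Dict.getD_modify_self, if_pos (List.mem_cons_self)]
      · rw [PySem.Dict.getD_modify_of_ne _ _ _ hxa, if_neg (by simp [hxa, hx])]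

-- A's branch test, pointwise: 'not disjoint' means a shared element
theorem pv_P_iff (R : List (List Int)) (item : List Int) (jj : Int)
    (h0 : 0 ≤ jj) (h1 : jj < (R.length : Int)) :
    ((!(PySem.Set.isdisjoint (PySem.List.pyGetD R jj []) item)) = true)
      ↔ ∃ x ∈ R[jj.toNat]'(by omega), x ∈ item := by
  rw [PySem.List.pyGetD_eq_getElem _ _ h0 h1]
  constructor
  · intro hp
    by_contra hno
    push_neg at hno
    have := (PySem.Set.isdisjoint_iff _ item).2 hno
    simp [this] at hp
  · intro ⟨x, hx, hxi⟩
    by_contra hp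
    simp only [Bool.not_eq_true, Bool.not_eq_false'] at hp
    exact ((PySem.Set.isdisjoint_iff _ item).1 hp) x hx hxi

-- one synchronized outer step: equal R-components, invariant preserved
theorem pv_step (R : List (List Int)) (d : PySem.Dict Int (PySem.Set Int)) (j0 : Int)
    (item : List Int) (hInv : pvInv R d) :
    (pvStepA (R, j0) item).1 = (pvStepB (R, d) item).1 ∧
      pvInv (pvStepB (R, d) item).1 (pvStepB (R, d) item).2 := by
  simp only [pvStepA, pvStepB]
  rw [pv_count_fold (fun i => !(PySem.Set.isdisjoint (PySem.List.pyGetD R i []) item))]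
  set P : Int → Bool := fun i => !(PySem.Set.isdisjoint (PySem.List.pyGetD R i []) item) with hP
  set F : List Int := (PySem.List.pyRange 0 (R.length : Int) 1).filter P with hF
  rw [pv_scan_spec]
  set Dl : List Int := item.flatMap (fun x => d.getD x []) with hD
  have hmem : ∀ jj : Int, jj ∈ Dl ↔ jj ∈ F := by
    intro jj
    rw [hD, List.mem_flatMap, hF, List.mem_filter, PySem.List.mem_pyRange_one]
    constructor
    · rintro ⟨x, hxitem, hxd⟩
      obtain ⟨k, hk, rfl, hxk⟩ := (hInv x jj).1 hxd
      have h0 : (0:Int) ≤ (k:Int) := by omega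
      have h1 : ((k:Int)) < (R.length : Int) := by exact_mod_cast hk
      refine ⟨⟨h0, h1⟩, ?_⟩
      rw [hP]
      simp only
      rw [pv_P_iff R item _ h0 h1]
      exact ⟨x, by simpa using hxk, hxitem⟩
    · rintro ⟨⟨h0, h1⟩, hp⟩
      rw [hP] at hp
      simp only at hp
      rw [pv_P_iff R item _ h0 h1] at hp
      obtain ⟨x, hxk, hxitem⟩ := hp
      exact ⟨x, hxitem, (hInv x jj).2 ⟨jj.toNat, by omega, by omega, hxk⟩⟩
  have hnodupF : F.Nodup := (PySem.List.nodup_pyRange_one 0 (R.length : Int)).filter P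
  match hFs : F with
  | [] =>
    have hDl : Dl = [] := by
      rw [List.eq_nil_iff_forall_not_mem]
      intro j hj
      simpa using (hmem j).1 hj
    rw [hDl]
    norm_num [pvHd]
    exact hInv
  | a :: b :: t =>
    have hab : a ≠ b := by
      intro h
      subst h
      simp at hnodupF
    have haD : a ∈ Dl := (hmem a).2 (by simp)
    have hbD : b ∈ Dl := (hmem b).2 (by simp)
    obtain ⟨h0, hD0⟩ : ∃ h0, Dl.head? = some h0 := by
      cases hc : Dl with
      | nil => rw [hc] at haD; simp at haD
      | cons c cs => exact ⟨c, rfl⟩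
    have hflag : Dl.any (fun j => !(some j == some h0)) = true := by
      rw [List.any_eq_true]
      by_cases hha : h0 = a
      · refine ⟨b, hbD, ?_⟩
        subst hha
        simp
        exact fun h => hab (h.symm)
      · refine ⟨a, haD, ?_⟩
        simp
        exact fun h => hha (h.symm)
    have hcond : ¬ (((0 : Int) + (((a :: b :: t).length : Nat) : Int) == 1) = true) := by
      simp only [beq_iff_eq, List.length_cons]
      push_cast
      omega
    rw [if_neg hcond]
    simp only [pvHd, hD0, hflag]
    exact ⟨trivial, hInv⟩
  | [a] =>
    have haDl : ∀ j ∈ Dl, j = a := by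
      intro j hj
      simpa using (hmem j).1 hj
    have haD : a ∈ Dl := (hmem a).2 (by simp)
    have hD0 : Dl.head? = some a := by
      cases hc : Dl with
      | nil => rw [hc] at haD; simp at haD
      | cons c cs =>
        have hca : c = a := haDl c (by rw [hc]; simp)
        simp [hca]
    have hflag : Dl.any (fun j => !(some j == some a)) = false := by
      rw [List.any_eq_false]
      intro j hj
      simp [haDl j hj]
    simp only [pvHd, hD0, hflag]
    simp only [List.getLastD_cons, List.getLastD_nil, List.length_cons, List.length_nil]
    norm_num
    -- the two updated lists coincide syntactically; it remains to prove the invariant for the new state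
    have haF : a ∈ List.filter P (PySem.List.pyRange 0 (R.length : Int) 1) := by
      rw [← hF]
      simp
    rw [List.mem_filter, PySem.List.mem_pyRange_one] at haF
    obtain ⟨⟨hi0, hi1⟩, hPa⟩ := haF
    have hitoNat : ((a.toNat : Int)) = a := Int.toNat_of_nonneg hi0
    have hiN : a.toNat < R.length := by omega
    have hri : PySem.List.pyGetD R a [] = R[a.toNat]'hiN :=
      PySem.List.pyGetD_eq_getElem _ _ hi0 hi1
    intro x jj
    rw [pv_discard_fold, PySem.List.pySetD_of_nonneg _ _ hi0]
    by_cases hxd : x ∈ PySem.Set.diff (PySem.List.pyGetD R a []) item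
    · rw [if_pos hxd]
      rw [PySem.Set.mem_diff] at hxd
      rw [PySem.Set.mem_discard, hInv x jj]
      constructor
      · rintro ⟨⟨k, hk, rfl, hxk⟩, hne⟩
        have hkne : a.toNat ≠ k := by omega
        refine ⟨k, by simpa using hk, rfl, ?_⟩
        rw [List.getElem_set, if_neg hkne]
        exact hxk
      · rintro ⟨k, hk, rfl, hxk⟩
        rw [List.length_set] at hk
        rw [List.getElem_set] at hxk
        by_cases hik : a.toNat = k
        · rw [if_pos hik] at hxk
          rw [PySem.Set.mem_inter] at hxk
          exact absurd hxk.2 hxd.2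
        · rw [if_neg hik] at hxk
          exact ⟨⟨k, hk, rfl, hxk⟩, by omega⟩
    · rw [if_neg hxd]
      rw [PySem.Set.mem_diff] at hxd
      push_neg at hxd
      rw [hInv x jj]
      constructor
      · rintro ⟨k, hk, rfl, hxk⟩
        refine ⟨k, by simpa using hk, rfl, ?_⟩
        rw [List.getElem_set]
        by_cases hik : a.toNat = k
        · rw [if_pos hik]
          rw [PySem.Set.mem_inter]
          subst hik
          have hxri : x ∈ PySem.List.pyGetD R a [] := by rw [hri]; exact hxk
          exact ⟨hxri, hxd hxri⟩
        · rw [if_neg hik]; exact hxk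
      · rintro ⟨k, hk, rfl, hxk⟩
        rw [List.length_set] at hk
        rw [List.getElem_set] at hxk
        by_cases hik : a.toNat = k
        · rw [if_pos hik] at hxk
          rw [PySem.Set.mem_inter, hri] at hxk
          subst hik
          exact ⟨a.toNat, hk, rfl, hxk.1⟩
        · rw [if_neg hik] at hxk
          exact ⟨k, hk, rfl, hxk⟩

theorem pv_main : ∀ (sets : List (List Int)) (R : List (List Int))
    (d : PySem.Dict Int (PySem.Set Int)) (j0 : Int), pvInv R d →
    (sets.foldl pvStepA (R, j0)).1 = (sets.foldl pvStepB (R, d)).1 := by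
  intro sets
  induction sets with
  | nil => intro R d j0 _; rfl
  | cons item sets ih =>
    intro R d j0 hInv
    rw [List.foldl_cons, List.foldl_cons]
    obtain ⟨h1, h2⟩ := pv_step R d j0 item hInv
    rw [show pvStepA (R, j0) item
          = ((pvStepB (R, d) item).1, (pvStepA (R, j0) item).2) from Prod.ext h1 rfl,
        show pvStepB (R, d) item
          = ((pvStepB (R, d) item).1, (pvStepB (R, d) item).2) from rfl]
    exact ih _ _ _ h2

-- ===== VERDICT (by name: the statement is the Claim_ definition above) =====
theorem excluding_phase_spec : Claim_equal_excluding_phase := by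
  intro R sets _
  unfold Spec_excluding_phase excluding_phase excluding_phase_alt
  exact pv_main sets R (pvBuildIdx R) 0 (pv_buildIdx_spec R)
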